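-- pv_equiv track=rewrite | github.com/xavnet82/NewsSearcher | src/classifier.py | _match_categories
-- ===== SOURCE A (Python) =====
-- from typing import Dict, List, Tuple
--
-- def _match_categories(text: str, mapping: Dict[str, List[str]]) -> List[str]:
--     hits = []
--     for k, terms in mapping.items():
--         for t in terms:
--             if t in text:
--                 hits.append(k)
--                 break
--     return hits
-- ===== SOURCE B (Python) =====
-- def _match_categories(text, mapping):
--     # Compute the set of distinct matching terms once, then filter the
--     # categories against it: no per-category scanning / break loop.
--     terms_all = dict.fromkeys(t for terms in mapping.values() for t in terms)
--     matched = {t for t in terms_all if t in text}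
--     return [k for k, terms in mapping.items() if any(t in matched for t in terms)]
-- ===== Notes on version B (the rewrite author's own statement) =====
-- stated objective: simpler
-- what changed: A's nested loop over categories with an inner break-loop of substring tests is replaced by computing once the set of distinct terms that occur in the text and then filtering the category list against that set, so the per-category scanning and the repeated tests of duplicate terms disappear.
import Mathlib
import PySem

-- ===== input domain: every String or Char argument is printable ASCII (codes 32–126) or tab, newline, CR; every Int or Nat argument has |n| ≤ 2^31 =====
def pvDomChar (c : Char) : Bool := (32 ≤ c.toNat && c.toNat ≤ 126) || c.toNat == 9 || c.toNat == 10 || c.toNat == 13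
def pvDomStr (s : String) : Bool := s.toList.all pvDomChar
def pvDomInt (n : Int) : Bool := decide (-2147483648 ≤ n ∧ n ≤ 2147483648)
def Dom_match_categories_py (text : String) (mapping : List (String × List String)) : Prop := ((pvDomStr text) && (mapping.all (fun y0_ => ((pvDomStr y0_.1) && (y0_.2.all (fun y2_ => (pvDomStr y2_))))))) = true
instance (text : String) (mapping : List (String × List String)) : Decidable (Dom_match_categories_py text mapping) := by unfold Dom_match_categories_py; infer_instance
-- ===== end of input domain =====

-- B replaces A's nested per-category break-loop by one dedup of all terms, one matched-set
-- comprehension, and a set-based filter of the categories (objective: simpler).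

-- ===== PORT A =====
-- inner 'for t in terms: if t in text: hits.append(k); break'
def pvAScanTerms (text : String) (k : String) (terms : List String) (hits : List String) : List String :=
  match terms with
  | [] => hits
  | t :: rest => if PySem.Str.isIn t text then hits ++ [k] else pvAScanTerms text k rest hits

def match_categories_py (text : String) (mapping : List (String × List String)) : List String :=
  mapping.foldl (fun hits kv => pvAScanTerms text kv.1 kv.2 hits) []

-- ===== PORT B =====
def match_categories_py_alt (text : String) (mapping : List (String × List String)) : List String :=
  let termsAll := PySem.List.dedup (mapping.flatMap (fun kv => kv.2))
  let matched : PySem.Set String :=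
    PySem.Set.ofList (termsAll.filter (fun t => PySem.Str.isIn t text))
  (mapping.filter (fun kv => kv.2.any (fun t => PySem.Set.contains matched t))).map (fun kv => kv.1)

-- ===== PRECONDITION & SPEC =====
def Spec_match_categories_py (text : String) (mapping : List (String × List String)) (out : List String) : Prop := out = match_categories_py_alt text mapping
instance (text : String) (mapping : List (String × List String)) (out : List String) : Decidable (Spec_match_categories_py text mapping out) := by unfold Spec_match_categories_py; infer_instance

-- ===== CLAIM (what is proved, stated in full; the proofs are below) =====
def Claim_equal_match_categories_py : Prop := ∀ (text : String) (mapping : List (String × List String)), Dom_match_categories_py text mapping → Spec_match_categories_py text mapping (match_categories_py text mapping)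

-- ===== LEMMAS AND PROOFS =====

-- A's inner break-loop appends k exactly when some term occurs in text
theorem pvAScanTerms_eq (text k : String) (terms : List String) (hits : List String) :
    pvAScanTerms text k terms hits =
      if terms.any (fun t => PySem.Str.isIn t text) then hits ++ [k] else hits := by
  induction terms with
  | nil => simp [pvAScanTerms]
  | cons t rest ih =>
      unfold pvAScanTerms
      rw [List.any_cons]
      by_cases h : PySem.Str.isIn t text = true
      · rw [if_pos h, if_pos (by rw [h, Bool.true_or])]
      · rw [if_neg h, ih]
        have h' : PySem.Str.isIn t text = false := by rwa [Bool.not_eq_true] at h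
        rw [h', Bool.false_or]

-- A's fold written as filter-then-map of the keys
theorem pvA_fold_eq (text : String) (mapping : List (String × List String)) (hits : List String) :
    mapping.foldl (fun hits kv => pvAScanTerms text kv.1 kv.2 hits) hits =
      hits ++ (mapping.filter (fun kv => kv.2.any (fun t => PySem.Str.isIn t text))).map (fun kv => kv.1) := by
  induction mapping generalizing hits with
  | nil => simp
  | cons kv rest ih =>
      rw [List.foldl_cons, List.filter_cons, pvAScanTerms_eq]
      by_cases h : (kv.2.any fun t => PySem.Str.isIn t text) = true
      · rw [if_pos h, if_pos h, ih, List.map_cons]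
        simp
      · rw [if_neg h, if_neg h, ih]

-- ===== VERDICT (by name: the statement is the Claim_ definition above) =====
theorem match_categories_py_spec : Claim_equal_match_categories_py := by
  intro text mapping _
  unfold Spec_match_categories_py match_categories_py match_categories_py_alt
  rw [pvA_fold_eq]
  simp only [List.nil_append]
  congr 1
  apply List.filter_congr
  intro kv hkv
  apply PySem.List.any_congr_mem
  intro t ht
  have hmem : t ∈ PySem.List.dedup (mapping.flatMap (fun kv => kv.2)) := by
    rw [PySem.List.mem_dedup]
    exact List.mem_flatMap.2 ⟨kv, hkv, ht⟩
  rw [Bool.eq_iff_iff, PySem.Set.contains_iff, PySem.Set.mem_ofList, List.mem_filter]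
  constructor
  · intro h; exact ⟨hmem, h⟩
  · rintro ⟨_, h⟩; exact h
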